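-- pv_equiv track=rewrite | github.com/ingki3/simpleclaw | src/simpleclaw/memory/protected_section.py | build_initial_template
-- ===== SOURCE A (Python) =====
-- def build_initial_template(header: str, sections: list[str]) -> str:
--     """비어있는 파일에 쓸 1차 템플릿을 생성한다.
--
--     형식:
--         # {header}
--
--         <!-- managed:dreaming:section1 -->
--         <!-- /managed:dreaming:section1 -->
--
--         <!-- managed:dreaming:section2 -->
--         <!-- /managed:dreaming:section2 -->
--
--     이 함수는 본 모듈에서 자동으로 호출되지 않는다. 자동 마커 삽입은 기존 사용자
--     콘텐츠를 덮어쓸 위험이 있으므로 명시적 부트스트랩(예: 설치 스크립트, 테스트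
--     fixture)에서만 호출되어야 한다.
--     """
--     parts: list[str] = [f"# {header}", ""]
--     for name in sections:
--         parts.append(f"<!-- managed:dreaming:{name} -->")
--         parts.append(f"<!-- /managed:dreaming:{name} -->")
--         parts.append("")
--     # 마지막 빈 줄 제거 후 trailing newline 한 개 보장
--     while parts and parts[-1] == "":
--         parts.pop()
--     parts.append("")
--     return "\n".join(parts)
-- ===== SOURCE B (Python) =====
-- def build_initial_template(header: str, sections: list[str]) -> str:
--     blocks = [
--         f"<!-- managed:dreaming:{name} -->\n<!-- /managed:dreaming:{name} -->"
--         for name in sections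
--     ]
--     return "\n\n".join([f"# {header}"] + blocks) + "\n"
-- ===== Notes on version B (the rewrite author's own statement) =====
-- stated objective: simpler
-- what changed: B builds each section as one two-line block and lets a '\n\n' join produce the blank lines, replacing A's sentinel blank-line entries and trailing-blank while-pop cleanup loop.
import Mathlib
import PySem

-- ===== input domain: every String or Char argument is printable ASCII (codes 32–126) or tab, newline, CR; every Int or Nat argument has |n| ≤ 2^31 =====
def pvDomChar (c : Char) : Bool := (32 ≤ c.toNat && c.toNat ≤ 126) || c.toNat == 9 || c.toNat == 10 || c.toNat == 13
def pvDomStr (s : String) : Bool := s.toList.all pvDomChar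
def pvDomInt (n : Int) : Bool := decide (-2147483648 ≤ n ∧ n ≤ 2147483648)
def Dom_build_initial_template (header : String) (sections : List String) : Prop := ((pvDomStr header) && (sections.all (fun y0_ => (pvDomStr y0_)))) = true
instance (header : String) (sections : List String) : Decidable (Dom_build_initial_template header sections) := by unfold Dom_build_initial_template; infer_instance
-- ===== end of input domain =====

-- B builds each section as one two-line block and joins with "\n\n", replacing A's
-- sentinel blank entries plus trailing-blank while-pop cleanup; same output, simpler.


-- ===== PORT A =====
-- the `while parts and parts[-1] == "": parts.pop()` loop: drop trailing "" entries
def trimTrailingBlanks : List String → List String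
  | [] => []
  | x :: xs =>
    match trimTrailingBlanks xs with
    | [] => if x = "" then [] else [x]
    | ys => x :: ys

def build_initial_template (header : String) (sections : List String) : String :=
  let parts : List String := ["# " ++ header, ""]
  let parts := sections.foldl
    (fun parts name =>
      parts ++ ["<!-- managed:dreaming:" ++ name ++ " -->"]
            ++ ["<!-- /managed:dreaming:" ++ name ++ " -->"]
            ++ [""]) parts
  let parts := trimTrailingBlanks parts
  let parts := parts ++ [""]
  PySem.Str.join "\n" parts

-- ===== PORT B =====
def build_initial_template_alt (header : String) (sections : List String) : String :=
  let blocks := sections.map (fun name =>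
    "<!-- managed:dreaming:" ++ name ++ " -->" ++ "\n" ++ "<!-- /managed:dreaming:" ++ name ++ " -->")
  PySem.Str.join "\n\n" (("# " ++ header) :: blocks) ++ "\n"

-- ===== PRECONDITION & SPEC =====
def Spec_build_initial_template (header : String) (sections : List String) (out : String) : Prop := out = build_initial_template_alt header sections
instance (header : String) (sections : List String) (out : String) : Decidable (Spec_build_initial_template header sections out) := by unfold Spec_build_initial_template; infer_instance

-- ===== CLAIM (what is proved, stated in full; the proofs are below) =====
def Claim_equal_build_initial_template : Prop := ∀ (header : String) (sections : List String), Dom_build_initial_template header sections → Spec_build_initial_template header sections (build_initial_template header sections)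

-- ===== LEMMAS AND PROOFS =====

-- string-level abbreviations for A's triples and B's blocks
def pvFlat (l : List String) : List String :=
  l.flatMap (fun name =>
    ["<!-- managed:dreaming:" ++ name ++ " -->",
     "<!-- /managed:dreaming:" ++ name ++ " -->", ""])

def pvBlkS (name : String) : String :=
  "<!-- managed:dreaming:" ++ name ++ " -->" ++ "\n" ++ "<!-- /managed:dreaming:" ++ name ++ " -->"

-- char-level open/close markers and B's block
def pvO (n : List Char) : List Char := "<!-- managed:dreaming:".toList ++ n ++ " -->".toList
def pvC (n : List Char) : List Char := "<!-- /managed:dreaming:".toList ++ n ++ " -->".toList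
def pvBlk (n : List Char) : List Char := pvO n ++ ['\n'] ++ pvC n

lemma A_unfold (header : String) (sections : List String) :
    build_initial_template header sections
    = PySem.Str.join "\n" (trimTrailingBlanks
        (sections.foldl
          (fun parts name =>
            parts ++ ["<!-- managed:dreaming:" ++ name ++ " -->"]
                  ++ ["<!-- /managed:dreaming:" ++ name ++ " -->"]
                  ++ [""]) ["# " ++ header, ""]) ++ [""]) := rfl

lemma B_unfold (header : String) (sections : List String) :
    build_initial_template_alt header sections
    = PySem.Str.join "\n\n" (("# " ++ header) :: sections.map pvBlkS) ++ "\n" := rfl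

-- A's foldl accumulates by appending fixed triples
lemma foldA_eq (sections : List String) (init : List String) :
    sections.foldl
      (fun parts name =>
        parts ++ ["<!-- managed:dreaming:" ++ name ++ " -->"]
              ++ ["<!-- /managed:dreaming:" ++ name ++ " -->"]
              ++ [""]) init
    = init ++ pvFlat sections := by
  induction sections generalizing init with
  | nil => simp [pvFlat]
  | cons a t ih =>
      simp only [List.foldl_cons]
      rw [ih]
      simp [pvFlat, List.flatMap_cons]

lemma trim_append_ne (xs : List String) (y : String) (hy : y ≠ "") :
    trimTrailingBlanks (xs ++ [y]) = xs ++ [y] := by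
  induction xs with
  | nil => simp [trimTrailingBlanks, hy]
  | cons a t ih =>
      simp only [List.cons_append, trimTrailingBlanks, ih]
      cases t <;> simp

lemma trim_append_blank (xs : List String) :
    trimTrailingBlanks (xs ++ [""]) = trimTrailingBlanks xs := by
  induction xs with
  | nil => simp [trimTrailingBlanks]
  | cons a t ih => simp only [List.cons_append, trimTrailingBlanks, ih]

lemma close_ne (n : String) : ("<!-- /managed:dreaming:" ++ n ++ " -->") ≠ "" := by
  intro h
  have := String.toList_inj.mpr h
  simp at this

lemma header_ne (h : String) : ("# " ++ h) ≠ "" := by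
  intro hh
  have := String.toList_inj.mpr hh
  simp at this

-- trimming A's parts list and re-appending "" restores the list when sections ≠ []
lemma trim_flat (l : List String) (a : String) (xs : List String) :
    trimTrailingBlanks (xs ++ pvFlat (a :: l)) ++ [""] = xs ++ pvFlat (a :: l) := by
  induction l generalizing a xs with
  | nil =>
      have h1 : xs ++ pvFlat [a]
        = (xs ++ ["<!-- managed:dreaming:" ++ a ++ " -->"]
             ++ ["<!-- /managed:dreaming:" ++ a ++ " -->"]) ++ [""] := by
        simp [pvFlat]
      rw [h1, trim_append_blank]
      rw [show xs ++ ["<!-- managed:dreaming:" ++ a ++ " -->"]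
             ++ ["<!-- /managed:dreaming:" ++ a ++ " -->"]
           = (xs ++ ["<!-- managed:dreaming:" ++ a ++ " -->"])
             ++ ["<!-- /managed:dreaming:" ++ a ++ " -->"] by simp]
      rw [trim_append_ne _ _ (close_ne a)]
  | cons b t ih =>
      have h1 : xs ++ pvFlat (a :: b :: t)
        = (xs ++ ["<!-- managed:dreaming:" ++ a ++ " -->",
            "<!-- /managed:dreaming:" ++ a ++ " -->", ""]) ++ pvFlat (b :: t) := by
        simp [pvFlat, List.flatMap_cons]
      rw [h1, ih]

-- char images of the string-level lists
lemma map_toList_flat (l : List String) :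
    (pvFlat l).map String.toList
    = (l.map String.toList).flatMap (fun n => [pvO n, pvC n, []]) := by
  induction l with
  | nil => simp [pvFlat]
  | cons a t ih =>
      simp [pvFlat, List.flatMap_cons, pvO, pvC] at ih ⊢
      exact ih

lemma map_toList_blk (l : List String) :
    (l.map pvBlkS).map String.toList = (l.map String.toList).map pvBlk := by
  induction l with
  | nil => simp
  | cons a t ih =>
      simp [pvBlkS, pvBlk, pvO, pvC] at ih ⊢

lemma toList_blkS (a : String) : (pvBlkS a).toList = pvBlk a.toList := by
  simp [pvBlkS, pvBlk, pvO, pvC]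

-- char-level: join "\n" over A's marker/blank triples = join "\n\n" over B's blocks, plus "\n"
lemma join_flat (l : List (List Char)) (a : List Char) :
    PySem.Chars.join ['\n'] ((a :: l).flatMap (fun n => [pvO n, pvC n, []]))
    = PySem.Chars.join ['\n', '\n'] ((a :: l).map pvBlk) ++ ['\n'] := by
  induction l generalizing a with
  | nil =>
      simp [List.flatMap_cons, PySem.Chars.join_cons_cons, PySem.Chars.join_singleton, pvBlk]
  | cons b t ih =>
      have hflat : (a :: b :: t).flatMap (fun n => [pvO n, pvC n, []])
          = pvO a :: pvC a :: [] :: (b :: t).flatMap (fun n => [pvO n, pvC n, []]) := by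
        simp [List.flatMap_cons]
      have hys : (b :: t).flatMap (fun n => [pvO n, pvC n, []])
          = pvO b :: (pvC b :: [] :: t.flatMap (fun n => [pvO n, pvC n, []])) := by
        simp [List.flatMap_cons]
      rw [hflat, PySem.Chars.join_cons_cons, hys, PySem.Chars.join_cons_cons,
        PySem.Chars.join_cons_cons, ← hys, ih b]
      simp [List.map_cons, PySem.Chars.join_cons_cons, pvBlk]

-- the two ports agree (unconditionally)
lemma ports_agree (header : String) (sections : List String) :
    build_initial_template header sections = build_initial_template_alt header sections := by
  rw [A_unfold, B_unfold, foldA_eq]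
  cases sections with
  | nil =>
      have ht : trimTrailingBlanks (["# " ++ header, ""] ++ pvFlat []) = ["# " ++ header] := by
        simp [pvFlat, trimTrailingBlanks, header_ne header]
      rw [ht]
      apply String.toList_inj.mp
      simp only [PySem.Str.toList_join, List.map_cons, List.map_nil,
        List.cons_append, List.nil_append, String.toList_append]
      rw [show ("" : String).toList = ([] : List Char) from rfl]
      rw [PySem.Chars.join_cons_cons, PySem.Chars.join_singleton, PySem.Chars.join_singleton]
      simp
  | cons a t =>
      rw [trim_flat t a ["# " ++ header, ""]]
      apply String.toList_inj.mp
      simp only [PySem.Str.toList_join, String.toList_append, List.map_cons, List.map_nil,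
        List.nil_append, List.cons_append, map_toList_flat, map_toList_blk, toList_blkS]
      rw [show ("" : String).toList = ([] : List Char) from rfl,
          show ("\n" : String).toList = ['\n'] from rfl,
          show ("\n\n" : String).toList = ['\n', '\n'] from rfl]
      rw [PySem.Chars.join_cons_cons]
      rw [show (a.toList :: List.map String.toList t).flatMap (fun n => [pvO n, pvC n, []])
            = pvO a.toList :: (pvC a.toList :: [] :: (List.map String.toList t).flatMap
                (fun n => [pvO n, pvC n, []])) from by simp [List.flatMap_cons]]
      rw [PySem.Chars.join_cons_cons]
      rw [show pvO a.toList :: (pvC a.toList :: [] :: (List.map String.toList t).flatMap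
                (fun n => [pvO n, pvC n, []]))
            = (a.toList :: List.map String.toList t).flatMap (fun n => [pvO n, pvC n, []])
            from by simp [List.flatMap_cons]]
      rw [join_flat (List.map String.toList t) a.toList]
      rw [PySem.Chars.join_cons_cons]
      simp

-- ===== VERDICT (by name: the statement is the Claim_ definition above) =====
theorem build_initial_template_spec : Claim_equal_build_initial_template := by
  intro header sections _
  exact ports_agree header sections
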